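-- pv_equiv track=rewrite | github.com/Ro-LiT/ets_local | games/game_files/sprites/sprite_remover.py | remove_const_array_from_h
-- ===== SOURCE A (Python) =====
-- def remove_const_array_from_h(lines, var_name):
--     out = []
--     skipping = False
--
--     for line in lines:
--         if not skipping:
--             if (
--                 "extern" in line
--                 and "const" in line
--                 and var_name in line
--                 or f"{var_name}_sprite" in line
--             ):
--                 skipping = True
--                 if ";" in line:
--                     skipping = False
--                 continue
--             out.append(line)
--         else:
--             if ";" in line:
--                 skipping = False
--
--     return out
-- ===== SOURCE B (Python) =====
-- def remove_const_array_from_h(lines, var_name):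
--     # Staged find-and-slice: locate the next trigger line, keep everything
--     # before it, locate the block-terminating ';' line, and restart after it.
--     out = []
--     rest = lines
--     while True:
--         j = next(
--             (k for k, line in enumerate(rest)
--              if ("extern" in line and "const" in line and var_name in line)
--              or f"{var_name}_sprite" in line),
--             None,
--         )
--         if j is None:
--             out.extend(rest)
--             return out
--         out.extend(rest[:j])
--         e = next((k for k in range(j, len(rest)) if ";" in rest[k]), None)
--         if e is None:
--             return out
--         rest = rest[e + 1:]
-- ===== Notes on version B (the rewrite author's own statement) =====
-- stated objective: alternative
-- what changed: Replaces A's per-line state-machine filter (skipping flag) with a staged find-and-slice scan: repeatedly search for the next trigger line, copy the untouched prefix wholesale, search for the terminating ';' line, and slice the list to restart after it.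
import Mathlib
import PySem

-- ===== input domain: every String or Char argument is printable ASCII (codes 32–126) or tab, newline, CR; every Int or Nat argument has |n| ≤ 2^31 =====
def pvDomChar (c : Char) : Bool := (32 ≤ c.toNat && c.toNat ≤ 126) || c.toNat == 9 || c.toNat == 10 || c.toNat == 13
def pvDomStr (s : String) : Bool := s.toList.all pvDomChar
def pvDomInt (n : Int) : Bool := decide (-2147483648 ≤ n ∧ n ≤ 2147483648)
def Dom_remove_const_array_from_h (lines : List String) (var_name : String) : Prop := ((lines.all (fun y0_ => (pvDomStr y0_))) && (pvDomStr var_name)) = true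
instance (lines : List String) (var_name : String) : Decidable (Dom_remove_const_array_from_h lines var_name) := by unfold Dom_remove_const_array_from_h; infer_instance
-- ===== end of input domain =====

-- B replaces A's per-line skipping-flag state machine with a staged find-and-slice scan
-- (search next trigger, copy the prefix, search the terminating ';', restart after it) —
-- alternative decomposition, same result.

-- trigger predicate, identical in both Pythons (Python precedence kept: and binds tighter than or)
def pvTrig (var_name line : String) : Bool :=
  (PySem.Str.isIn "extern" line && PySem.Str.isIn "const" line && PySem.Str.isIn var_name line)
    || PySem.Str.isIn (var_name ++ "_sprite") line

-- ===== PORT A =====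
-- A's loop: fold over the lines with state (out, skipping), exactly A's branches in order
def pvAStep (var_name : String) (st : List String × Bool) (line : String) : List String × Bool :=
  if st.2 = false then
    if pvTrig var_name line then
      (st.1, if PySem.Str.isIn ";" line then false else true)
    else
      (st.1 ++ [line], st.2)
  else
    if PySem.Str.isIn ";" line then (st.1, false) else st

def remove_const_array_from_h (lines : List String) (var_name : String) : List String :=
  (lines.foldl (pvAStep var_name) ([], false)).1

-- ===== PORT B =====
-- Source B's while-True loop: j = first trigger index (next/enumerate ↦ findIdx?);
-- out.extend(rest[:j]) ↦ take j; e = first ';' index from j on; rest = rest[e+1:] ↦ drop.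
def pvBLoop (var_name : String) (rest : List String) : List String :=
  match hj : rest.findIdx? (fun line => pvTrig var_name line) with
  | none => rest
  | some j =>
    match (rest.drop j).findIdx? (fun line => PySem.Str.isIn ";" line) with
    | none => rest.take j
    | some e => rest.take j ++ pvBLoop var_name (rest.drop (j + e + 1))
termination_by rest.length
decreasing_by
  have hjlt : j < rest.length := (List.findIdx?_eq_some_iff_getElem.mp hj).1
  simp only [List.length_drop]; omega

def remove_const_array_from_h_alt (lines : List String) (var_name : String) : List String :=
  pvBLoop var_name lines

-- ===== PRECONDITION & SPEC =====
def Spec_remove_const_array_from_h (lines : List String) (var_name : String) (out : List String) : Prop := out = remove_const_array_from_h_alt lines var_name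
instance (lines : List String) (var_name : String) (out : List String) : Decidable (Spec_remove_const_array_from_h lines var_name out) := by unfold Spec_remove_const_array_from_h; infer_instance

-- ===== CLAIM (what is proved, stated in full; the proofs are below) =====
def Claim_equal_remove_const_array_from_h : Prop := ∀ (lines : List String) (var_name : String), Dom_remove_const_array_from_h lines var_name → Spec_remove_const_array_from_h lines var_name (remove_const_array_from_h lines var_name)

-- ===== LEMMAS AND PROOFS =====

-- pure recursive characterisation of A's fold
def pvAPure (var_name : String) : Bool → List String → List String
  | _, [] => []
  | false, l :: r =>
      if pvTrig var_name l then
        (if PySem.Str.isIn ";" l then pvAPure var_name false r else pvAPure var_name true r)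
      else l :: pvAPure var_name false r
  | true, l :: r =>
      if PySem.Str.isIn ";" l then pvAPure var_name false r else pvAPure var_name true r

theorem pvFoldl_eq_pure (var_name : String) (ls : List String) :
    ∀ (out : List String) (s : Bool),
      (ls.foldl (pvAStep var_name) (out, s)).1 = out ++ pvAPure var_name s ls := by
  induction ls with
  | nil => intro out s; simp [pvAPure]
  | cons l r ih =>
      intro out s
      cases s with
      | false =>
          by_cases ht : pvTrig var_name l
          · by_cases hs : PySem.Chars.isIn [';'] l.toList = true
            · simp [List.foldl_cons, pvAStep, ht, hs, pvAPure, ih]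
            · simp [List.foldl_cons, pvAStep, ht, hs, pvAPure, ih]
          · simp [List.foldl_cons, pvAStep, ht, pvAPure, ih]
      | true =>
          by_cases hs : PySem.Chars.isIn [';'] l.toList = true
          · simp [List.foldl_cons, pvAStep, hs, pvAPure, ih]
          · simp [List.foldl_cons, pvAStep, hs, pvAPure, ih]

-- if no line triggers, A keeps everything
theorem pvAPure_no_trig (var_name : String) (ls : List String)
    (h : ∀ x ∈ ls, pvTrig var_name x = false) : pvAPure var_name false ls = ls := by
  induction ls with
  | nil => rfl
  | cons l r ih =>
      have hl : pvTrig var_name l = false := h l (by simp)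
      simp [pvAPure, hl, ih (fun x hx => h x (by simp [hx]))]

-- A's skipping=true state = drop up to and including the first ';' line
theorem pvAPure_true_eq (var_name : String) (ls : List String) :
    pvAPure var_name true ls =
      match ls.findIdx? (fun line => PySem.Str.isIn ";" line) with
      | none => []
      | some e => pvAPure var_name false (ls.drop (e + 1)) := by
  induction ls with
  | nil => rfl
  | cons l r ih =>
      simp only [pvAPure, List.findIdx?_cons]
      by_cases hs : PySem.Str.isIn ";" l = true
      · rw [if_pos hs, if_pos hs]; rfl
      · rw [if_neg hs, if_neg hs, ih]
        cases hr : r.findIdx? (fun line => PySem.Str.isIn ";" line) with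
        | none => rfl
        | some e' => rfl

-- A at a trigger line = drop through the first ';' line (which may be the trigger line itself)
theorem pvAPure_trig_eq (var_name l : String) (r : List String) (ht : pvTrig var_name l = true) :
    pvAPure var_name false (l :: r) =
      match (l :: r).findIdx? (fun line => PySem.Str.isIn ";" line) with
      | none => []
      | some e => pvAPure var_name false ((l :: r).drop (e + 1)) := by
  simp only [pvAPure, List.findIdx?_cons, if_pos ht]
  by_cases hs : PySem.Str.isIn ";" l = true
  · rw [if_pos hs, if_pos hs]; rfl
  · rw [if_neg hs, if_neg hs, pvAPure_true_eq]
    cases hr : r.findIdx? (fun line => PySem.Str.isIn ";" line) with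
    | none => rfl
    | some e' => rfl

-- the first j lines are non-trigger ⟹ A keeps them verbatim
theorem pvAPure_split (var_name : String) (ls : List String) (j : Nat)
    (h : ∀ (k : Nat) (hk : k < ls.length), k < j → pvTrig var_name ls[k] = false) :
    pvAPure var_name false ls = ls.take j ++ pvAPure var_name false (ls.drop j) := by
  induction ls generalizing j with
  | nil => simp
  | cons l r ih =>
      cases j with
      | zero => simp
      | succ j' =>
          have hl : pvTrig var_name l = false := h 0 (by simp) (by omega)
          have hr : ∀ (k : Nat) (hk : k < r.length), k < j' → pvTrig var_name r[k] = false := by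
            intro k hk hkj
            have := h (k + 1) (by simp; omega) (by omega)
            simpa using this
          simp [pvAPure, hl, ih j' hr]

-- B's staged scan computes A's pure function
theorem pvBLoop_eq_pure (var_name : String) (ls : List String) :
    pvBLoop var_name ls = pvAPure var_name false ls := by
  unfold pvBLoop
  split
  · rename_i hj
    rw [pvAPure_no_trig var_name ls (fun x hx => List.findIdx?_eq_none_iff.mp hj x hx)]
  · rename_i j hj
    obtain ⟨hjlt, htrig, -⟩ := List.findIdx?_eq_some_iff_getElem.mp hj
    have hpre : ∀ (k : Nat) (hk : k < ls.length), k < j → pvTrig var_name ls[k] = false := by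
      intro k hk hkj
      have := (List.findIdx?_eq_some_iff_getElem.mp hj).2.2 k hkj
      simpa using this
    have hdrop : ls.drop j = ls[j] :: ls.drop (j + 1) := List.drop_eq_getElem_cons hjlt
    rw [pvAPure_split var_name ls j hpre, hdrop,
        pvAPure_trig_eq var_name ls[j] (ls.drop (j + 1)) htrig, ← hdrop]
    split
    · simp
    · rename_i e he
      have hd : List.drop (e + 1) (List.drop j ls) = List.drop (j + e + 1) ls := by
        rw [List.drop_drop, Nat.add_assoc]
      rw [hd, pvBLoop_eq_pure var_name (ls.drop (j + e + 1))]
termination_by ls.length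
decreasing_by
  simp only [List.length_drop]; omega

-- ===== VERDICT (by name: the statement is the Claim_ definition above) =====
theorem remove_const_array_from_h_spec : Claim_equal_remove_const_array_from_h := by
  intro lines var_name _
  unfold Spec_remove_const_array_from_h remove_const_array_from_h remove_const_array_from_h_alt
  rw [pvFoldl_eq_pure, pvBLoop_eq_pure]
  simp
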